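-- pv_equiv track=rewrite | github.com/chrilef/BactEpiGenPro | SeqWord MotifMapper 3.2.6 [16.03.2025]-20250317T093543Z-001/SeqWord MotifMapper 3.2.6 [16.03.2025]/lib/tools.py | inlist_motifs
-- ===== SOURCE A (Python) =====
-- from functools import reduce
--
-- rev_translation = [["A","T"],["T","A"],["G","C"],["C","G"],["R","Y"],["Y","R"],
--                     ["K","M"],["M","K"],["B","V"],["V","B"],["D","H"],["H","D"]]
--
-- def inlist_motifs(motif,flg_reverse_complement = False):
--     ls = []
--     p = 0
--     wlength = len(motif)
--     while p < wlength:
--         if motif[p] == "[":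
--             s = motif.find("]",p+1)
--             if not ls:
--                 ls = motif[p+1:s].split(",")
--             else:
--                 ls = reduce(lambda ls1,ls2: ls1+ls2, list(map(lambda l: list(map(lambda w: w+l, ls)), motif[p+1:s].split(","))))
--             p = s+1
--         else:
--             if not ls:
--                 ls = [motif[p]]
--             else:
--                 ls = list(map(lambda w: w+motif[p], ls))
--             p += 1
--     if flg_reverse_complement:
--         ls = list(map(lambda w: reverse_complement(w), ls))
--     return ls
--
-- def reverse_complement(w, reverse=True):
--     transtable = "".maketrans("".join(list(map(lambda ls: ls[0], rev_translation))),"".join(list(map(lambda ls: ls[1], rev_translation))))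
--     w = list(w.upper().translate(transtable))
--     if reverse:
--         w.reverse()
--     return "".join(w)
-- ===== SOURCE B (Python) =====
-- _COMP = {"A":"T","T":"A","G":"C","C":"G","R":"Y","Y":"R",
--          "K":"M","M":"K","B":"V","V":"B","D":"H","H":"D"}
--
-- def inlist_motifs(motif, flg_reverse_complement=False):
--     # Phase 1: parse the motif into a table of choice groups.
--     groups = []
--     i = 0
--     n = len(motif)
--     while i < n:
--         if motif[i] == "[":
--             j = i + 1
--             while j < n and motif[j] != "]":
--                 j += 1
--             groups.append(motif[i+1:j].split(","))
--             i = j + 1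
--         else:
--             groups.append([motif[i]])
--             i += 1
--     if not groups:
--         return []
--     # Phase 2: mixed-radix decoding: word #t takes from group j the option
--     # numbered (t // (n_1*...*n_{j-1})) % n_j, so group 1 varies fastest.
--     total = 1
--     for g in groups:
--         total *= len(g)
--     ls = []
--     for t in range(total):
--         r = t
--         parts = []
--         for g in groups:
--             r, k = divmod(r, len(g))
--             parts.append(g[k])
--         ls.append("".join(parts))
--     if flg_reverse_complement:
--         ls = [reverse_complement(w) for w in ls]
--     return ls
--
-- def reverse_complement(w, reverse=True):
--     chars = [_COMP.get(c, c) for c in w.upper()]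
--     if reverse:
--         chars.reverse()
--     return "".join(chars)
-- ===== Notes on version B (the rewrite author's own statement) =====
-- stated objective: faster
-- what changed: A builds the result incrementally, re-copying the whole accumulator list of partial words at every motif position; B parses the groups once, computes the product of their sizes, and generates word #t directly by mixed-radix decoding of t (repeated divmod by the group sizes), so each output word is materialised only once.
-- outside the precondition, e.g. on inlist_motifs('[', False): A does not finish within the time limit, B returns ['']
import Mathlib
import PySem

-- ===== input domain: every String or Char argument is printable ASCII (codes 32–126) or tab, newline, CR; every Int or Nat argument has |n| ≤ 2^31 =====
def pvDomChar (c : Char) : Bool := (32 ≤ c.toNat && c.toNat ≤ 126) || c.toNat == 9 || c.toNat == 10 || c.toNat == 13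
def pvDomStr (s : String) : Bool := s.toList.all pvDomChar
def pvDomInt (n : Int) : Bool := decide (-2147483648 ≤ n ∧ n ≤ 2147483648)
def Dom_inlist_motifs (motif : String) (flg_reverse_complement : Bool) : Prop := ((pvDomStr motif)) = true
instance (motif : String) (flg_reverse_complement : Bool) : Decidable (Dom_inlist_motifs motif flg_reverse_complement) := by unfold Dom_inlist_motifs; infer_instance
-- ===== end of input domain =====

-- B replaces A's incremental product building with mixed-radix decoding: it parses the
-- groups once, multiplies their sizes, and generates word #t directly from the digits of t.


-- ===== PORT A =====
-- module constant rev_translation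
def pvRevTranslation : List (Char × Char) :=
  [('A','T'),('T','A'),('G','C'),('C','G'),('R','Y'),('Y','R'),
   ('K','M'),('M','K'),('B','V'),('V','B'),('D','H'),('H','D')]

-- str.translate(maketrans(...)) in A / _COMP.get(c, c) in B: per-character first-match
-- translation over the 12 pairs (exact: the table has no duplicate keys)
def pvTransChar (c : Char) : Char :=
  match pvRevTranslation.find? (fun pr => pr.1 == c) with
  | some pr => pr.2
  | none => c

-- reverse_complement(w) (both Pythons call it only with the default reverse=True):
-- upper, translate each char, reverse, join — shared helper, exact for both sources
def pvRevComp (w : List Char) : List Char :=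
  ((PySem.Chars.upper w).map pvTransChar).reverse

-- A's while-loop; fuel = one unit per iteration (under Pre_ each iteration advances p by
-- ≥ 1, so fuel cs.length + 1 is never exhausted; Python A diverges outside Pre_)
def inlistLoop (cs : List Char) : Nat → Int → List (List Char) → List (List Char)
  | 0, _, ls => ls
  | fuel+1, p, ls =>
    if p < PySem.List.len cs then
      if PySem.List.pyGetD cs p ' ' == '[' then
        let s := PySem.Chars.findFrom cs [']'] (p+1)
        let seg := PySem.Chars.splitOn (PySem.List.slice cs (some (p+1)) (some s)) [',']
        inlistLoop cs fuel (s+1)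
          (if ls.isEmpty then seg
           else (seg.map (fun l => ls.map (fun w => w ++ l))).flatten)
      else
        inlistLoop cs fuel (p+1)
          (if ls.isEmpty then [[PySem.List.pyGetD cs p ' ']]
           else ls.map (fun w => w ++ [PySem.List.pyGetD cs p ' ']))
    else ls

def inlist_motifs (motif : String) (flg_reverse_complement : Bool) : List String :=
  let cs := motif.toList
  let ls := inlistLoop cs (cs.length + 1) 0 []
  (if flg_reverse_complement then ls.map pvRevComp else ls).map String.mk

-- ===== PORT B =====
-- Phase 1: one group per position — the inner while 'skip until ]' is takeWhile
def motifGroups (cs : List Char) : List (List (List Char)) :=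
  match cs with
  | [] => []
  | c :: rest =>
    if c = '[' then
      let buf := rest.takeWhile (fun x => x != ']')
      PySem.Chars.splitOn buf [','] :: motifGroups (rest.drop (buf.length + 1))
    else [[c]] :: motifGroups rest
termination_by cs.length
decreasing_by
  · simp only [List.length_drop, List.length_cons]; omega
  · simp

-- total = 1; for g in groups: total *= len(g)
def motifTotal (gs : List (List (List Char))) : Nat :=
  gs.foldl (fun a g => a * g.length) 1

-- the inner 'for g in groups: r, k = divmod(r, len(g)); parts.append(g[k])' loop;
-- Nat % and / are exact for Python divmod here: r ≥ 0 and len(g) ≥ 1 always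
def motifDecode (gs : List (List (List Char))) (r : Nat) : List Char :=
  match gs with
  | [] => []
  | g :: rest => g.getD (r % g.length) [] ++ motifDecode rest (r / g.length)

def inlist_motifs_alt (motif : String) (flg_reverse_complement : Bool) : List String :=
  let gs := motifGroups motif.toList
  let ls := if gs.isEmpty then []
            else (List.range (motifTotal gs)).map (motifDecode gs)
  (if flg_reverse_complement then ls.map pvRevComp else ls).map String.mk

-- ===== PRECONDITION & SPEC =====
-- Pre_ excludes motifs containing a '[' with no ']' anywhere after it: there Python A
-- never returns (s = find(...) = -1 resets p to 0 and the while-loop runs forever).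
def Pre_inlist_motifs (motif : String) (flg_reverse_complement : Bool) : Prop :=
  ∀ i : Nat, i < motif.toList.length → motif.toList[i]? = some '[' →
    ']' ∈ motif.toList.drop (i+1)
instance (motif : String) (flg_reverse_complement : Bool) : Decidable (Pre_inlist_motifs motif flg_reverse_complement) := by unfold Pre_inlist_motifs; infer_instance

def pvWitness_inlist_motifs : String × Bool := ("[A,T]C", false)

def Spec_inlist_motifs (motif : String) (flg_reverse_complement : Bool) (out : List String) : Prop := out = inlist_motifs_alt motif flg_reverse_complement
instance (motif : String) (flg_reverse_complement : Bool) (out : List String) : Decidable (Spec_inlist_motifs motif flg_reverse_complement out) := by unfold Spec_inlist_motifs; infer_instance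

-- ===== CLAIM (what is proved, stated in full; the proofs are below) =====
def Claim_equal_inlist_motifs : Prop := ∀ (motif : String) (flg_reverse_complement : Bool), Dom_inlist_motifs motif flg_reverse_complement → Pre_inlist_motifs motif flg_reverse_complement → Spec_inlist_motifs motif flg_reverse_complement (inlist_motifs motif flg_reverse_complement)

-- ===== LEMMAS AND PROOFS =====

-- A's per-position accumulator update, abstracted over the group of that position
def stepA (ls g : List (List Char)) : List (List Char) :=
  if ls.isEmpty then g else (g.map (fun l => ls.map (fun w => w ++ l))).flatten

-- the non-empty-accumulator form of the update
def stepB (ls g : List (List Char)) : List (List Char) :=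
  g.flatMap (fun opt => ls.map (fun w => w ++ opt))

lemma stepA_nil (g : List (List Char)) : stepA [] g = g := by simp [stepA]

lemma stepA_of_ne_nil (ls g : List (List Char)) (h : ls ≠ []) : stepA ls g = stepB ls g := by
  simp [stepA, stepB, h, List.flatMap_def]

lemma stepB_ne_nil (ls g : List (List Char)) (hl : ls ≠ []) (hg : g ≠ []) :
    stepB ls g ≠ [] := by
  cases g with
  | nil => exact absurd rfl hg
  | cons o t =>
    cases ls with
    | nil => exact absurd rfl hl
    | cons w ws => simp [stepB]

lemma splitOn_go_ne_nil (sep : List Char) :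
    ∀ (fuel : Nat) (l cur : List Char) (acc : List (List Char)),
      PySem.Chars.splitOn.go sep fuel l cur acc ≠ [] := by
  intro fuel
  induction fuel with
  | zero =>
    intro l cur acc
    rw [PySem.Chars.splitOn.go.eq_def]
    cases l <;> simp
  | succ n ih =>
    intro l cur acc
    rw [PySem.Chars.splitOn.go.eq_def]
    cases l with
    | nil => simp
    | cons c rest =>
      dsimp only
      split
      · exact ih _ _ _
      · exact ih _ _ _

lemma splitOn_ne_nil (s sep : List Char) : PySem.Chars.splitOn s sep ≠ [] := by
  unfold PySem.Chars.splitOn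
  exact splitOn_go_ne_nil sep _ s [] []

lemma motifGroups_ne_nil : ∀ (cs : List Char), ∀ g ∈ motifGroups cs, g ≠ [] := by
  intro cs
  induction cs using motifGroups.induct with
  | case1 => intro g hg; simp [motifGroups] at hg
  | case2 tl buf ih =>
    intro g hg
    rw [motifGroups] at hg
    simp only [if_pos rfl] at hg
    rcases List.mem_cons.1 hg with hg | hg
    · exact hg ▸ splitOn_ne_nil _ _
    · exact ih g hg
  | case3 c tl hc ih =>
    intro g hg
    rw [motifGroups, if_neg hc] at hg
    rcases List.mem_cons.1 hg with hg | hg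
    · simp [hg]
    · exact ih g hg

-- motifTotal is the product of the group sizes
lemma motifTotal_foldl (a : Nat) (gs : List (List (List Char))) :
    gs.foldl (fun a g => a * g.length) a = a * motifTotal gs := by
  induction gs generalizing a with
  | nil => simp [motifTotal]
  | cons g t ih =>
    rw [List.foldl_cons, ih]
    conv_rhs => rw [motifTotal, List.foldl_cons, ih]
    ring

lemma motifTotal_cons (g : List (List Char)) (gs : List (List (List Char))) :
    motifTotal (g :: gs) = g.length * motifTotal gs := by
  rw [motifTotal, List.foldl_cons, motifTotal_foldl]
  ring

-- flatMap with singleton results is map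
lemma flatMap_pure_map {X Y : Type} (f : X → Y) (l : List X) :
    l.flatMap (fun x => [f x]) = l.map f := by
  induction l with
  | nil => rfl
  | cons a t ih => simp [ih]

-- pointwise congruence for flatMap
lemma flatMap_congr_mem {X Y : Type} {l : List X} {f g : X → List Y}
    (h : ∀ x ∈ l, f x = g x) : l.flatMap f = l.flatMap g := by
  simp only [List.flatMap_def]
  exact congrArg List.flatten (List.map_congr_left h)

-- enumerating range (n*P) = outer index q in range P, inner index i in range n
lemma range_mul_flatMap {X : Type} (n : Nat) (f : Nat → List X) :
    ∀ P : Nat, (List.range (n * P)).flatMap f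
      = (List.range P).flatMap (fun q => (List.range n).flatMap (fun i => f (q * n + i))) := by
  intro P
  induction P with
  | zero => simp
  | succ P ih =>
    rw [Nat.mul_succ, List.range_add, List.flatMap_append, ih, List.range_succ,
      List.flatMap_append, List.flatMap_singleton]
    congr 1
    rw [List.flatMap_map]
    apply flatMap_congr_mem
    intro i _
    simp [Function.comp, Nat.mul_comm]

-- a list is the range of its indices through getD
lemma map_range_getD {X : Type} (d : X) :
    ∀ g : List X, (List.range g.length).map (fun i => g.getD i d) = g := by
  intro g
  induction g with
  | nil => rfl
  | cons a t ih =>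
    rw [List.length_cons, List.range_succ_eq_map, List.map_cons, List.map_map]
    have h1 : ((fun i => (a :: t).getD i d) ∘ (· + 1)) = (fun i => t.getD i d) := by
      funext i
      simp [Function.comp, List.getD_cons_succ]
    rw [h1, ih, List.getD_cons_zero]

-- stepB enumerated by option index
lemma stepB_enum (ls g : List (List Char)) :
    stepB ls g = (List.range g.length).flatMap
      (fun i => ls.map (fun w => w ++ g.getD i [])) := by
  unfold stepB
  conv_lhs => rw [← map_range_getD ([] : List Char) g]
  rw [List.flatMap_map]

-- decoding at q * n + i picks option i from the head group and q for the rest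
lemma decode_cons (g : List (List Char)) (t : List (List (List Char))) (q i : Nat)
    (hi : i < g.length) :
    motifDecode (g :: t) (q * g.length + i) = g.getD i [] ++ motifDecode t q := by
  have hn : 0 < g.length := Nat.lt_of_le_of_lt (Nat.zero_le i) hi
  rw [motifDecode]
  congr 2
  · rw [Nat.mul_add_mod', Nat.mod_eq_of_lt hi]
  · rw [Nat.add_comm, Nat.add_mul_div_right _ _ hn, Nat.div_eq_of_lt hi, Nat.zero_add]

-- key lemma: the fold of stepB computes exactly B's mixed-radix enumeration
lemma fold_stepB_enum :
    ∀ (gs : List (List (List Char))) (ls : List (List Char)),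
      gs.foldl stepB ls
        = (List.range (motifTotal gs)).flatMap
            (fun r => ls.map (fun w => w ++ motifDecode gs r)) := by
  intro gs
  induction gs with
  | nil =>
    intro ls
    simp [motifTotal, motifDecode, List.range_succ]
  | cons g t ih =>
    intro ls
    rw [List.foldl_cons, ih (stepB ls g), motifTotal_cons,
      range_mul_flatMap g.length _ (motifTotal t)]
    apply flatMap_congr_mem
    intro q _
    have hq : (List.range g.length).flatMap
        (fun i => ls.map (fun w => w ++ motifDecode (g :: t) (q * g.length + i)))
        = (List.range g.length).flatMap
            (fun i => ls.map (fun w => w ++ (g.getD i [] ++ motifDecode t q))) := by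
      apply flatMap_congr_mem
      intro i hi
      rw [decode_cons g t q i (List.mem_range.1 hi)]
    rw [hq, stepB_enum, List.map_flatMap]
    apply flatMap_congr_mem
    intro i _
    simp [List.map_map, Function.comp, List.append_assoc]

-- the seed [''] is neutral for stepB
lemma stepB_seed (g : List (List Char)) : stepB [[]] g = g := by
  simp [stepB, List.flatMap_def, List.flatten_eq_nil_iff]
  induction g with
  | nil => rfl
  | cons o t ih => simp [ih]

lemma fold_stepA_eq_stepB (gs : List (List (List Char))) :
    ∀ (ls : List (List Char)), (∀ g ∈ gs, g ≠ []) → ls ≠ [] →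
      gs.foldl stepA ls = gs.foldl stepB ls := by
  induction gs with
  | nil => intro ls _ _; rfl
  | cons g t ih =>
    intro ls hg hl
    simp only [List.foldl_cons]
    rw [stepA_of_ne_nil ls g hl]
    exact ih _ (fun g' h' => hg g' (List.mem_cons_of_mem _ h'))
      (stepB_ne_nil ls g hl (hg g (List.mem_cons_self)))

lemma fold_from_nil (gs : List (List (List Char))) (hg : ∀ g ∈ gs, g ≠ []) :
    gs.foldl stepA []
      = if gs.isEmpty then [] else (List.range (motifTotal gs)).map (motifDecode gs) := by
  cases gs with
  | nil => rfl
  | cons g t =>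
    rw [if_neg (by simp)]
    simp only [List.foldl_cons, stepA_nil]
    rw [fold_stepA_eq_stepB t g (fun g' h' => hg g' (List.mem_cons_of_mem _ h'))
      (hg g (List.mem_cons_self))]
    have hseed : t.foldl stepB g = (g :: t).foldl stepB [[]] := by
      rw [List.foldl_cons, stepB_seed]
    rw [hseed, fold_stepB_enum (g :: t) [[]]]
    have h1 : (fun r => ([[]] : List (List Char)).map (fun w => w ++ motifDecode (g :: t) r))
        = (fun r => [motifDecode (g :: t) r]) := by
      funext r
      simp
    rw [h1, flatMap_pure_map]

-- takeWhile facts for (· != c)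
lemma take_takeWhile {α : Type} (p : α → Bool) (l : List α) :
    l.take (l.takeWhile p).length = l.takeWhile p := by
  induction l with
  | nil => rfl
  | cons x t ih =>
    by_cases h : p x
    · simp [List.takeWhile_cons, h, ih]
    · simp [List.takeWhile_cons, h]

lemma takeWhile_mem_getElem (c : Char) :
    ∀ l : List Char, c ∈ l →
      l[(l.takeWhile (fun x => x != c)).length]? = some c := by
  intro l
  induction l with
  | nil => intro h; simp at h
  | cons x t ih =>
    intro h
    by_cases hx : x = c
    · subst hx; simp [List.takeWhile_cons]
    · have hxc : (x != c) = true := by simp [hx]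
      have hmem : c ∈ t := by rcases List.mem_cons.1 h with h' | h'; exact absurd h'.symm hx; exact h'
      simp [List.takeWhile_cons, hxc, ih hmem]

lemma takeWhile_before_getElem (c : Char) :
    ∀ (l : List Char) (i : Nat), i < (l.takeWhile (fun x => x != c)).length →
      l[i]? ≠ some c := by
  intro l
  induction l with
  | nil => intro i h; simp [List.takeWhile] at h
  | cons x t ih =>
    intro i h
    by_cases hx : x = c
    · subst hx; simp [List.takeWhile_cons] at h
    · have hxc : (x != c) = true := by simp [hx]
      rw [List.takeWhile_cons, if_pos hxc] at h
      cases i with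
      | zero => simpa using hx
      | succ j =>
        simp only [List.getElem?_cons_succ]
        exact ih j (by simpa using h)

lemma singleton_prefix_drop (l : List Char) (k : Nat) (c : Char) :
    [c] <+: l.drop k ↔ l[k]? = some c := by
  rw [← List.head?_drop]
  constructor
  · rintro ⟨t, ht⟩
    rw [← ht]
    rfl
  · intro h
    cases hd : (l.drop k) with
    | nil => rw [hd] at h; simp at h
    | cons y t =>
      rw [hd] at h
      simp only [List.head?_cons, Option.some.injEq] at h
      exact ⟨t, by simp [hd, h]⟩

lemma find_singleton (l : List Char) (c : Char) (h : c ∈ l) :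
    PySem.Chars.find l [c] = ((l.takeWhile (fun x => x != c)).length : Int) := by
  have hinf : [c] <:+: l := by
    obtain ⟨pre, suf, hps⟩ := List.append_of_mem h
    exact ⟨pre, suf, by rw [hps]; simp⟩
  have h0 : 0 ≤ PySem.Chars.find l [c] := (PySem.Chars.find_nonneg_iff _ _).2 hinf
  obtain ⟨hpre, hmin⟩ := PySem.Chars.find_spec h0
  set k := (l.takeWhile (fun x => x != c)).length with hk
  have hfound : l[(PySem.Chars.find l [c]).toNat]? = some c :=
    (singleton_prefix_drop _ _ _).1 hpre
  have heq : (PySem.Chars.find l [c]).toNat = k := by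
    rcases lt_trichotomy (PySem.Chars.find l [c]).toNat k with hlt | he | hgt
    · exact absurd hfound (takeWhile_before_getElem c l _ hlt)
    · exact he
    · exact absurd ((singleton_prefix_drop _ _ _).2 (takeWhile_mem_getElem c l h))
        (hmin k hgt)
  omega

-- one unfolding of A's loop when the head of the remaining suffix is '['
lemma loop_eq_fold (cs : List Char)
    (hpre : ∀ i : Nat, i < cs.length → cs[i]? = some '[' → ']' ∈ cs.drop (i+1)) :
    ∀ (fuel pn : Nat) (ls : List (List Char)), cs.length - pn < fuel →
      inlistLoop cs fuel (pn : Int) ls = (motifGroups (cs.drop pn)).foldl stepA ls := by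
  intro fuel
  induction fuel with
  | zero => intro pn ls h; omega
  | succ f ih =>
    intro pn ls hfuel
    by_cases hp : pn < cs.length
    · have hguard : ((pn : Int) < PySem.List.len cs) := by
        rw [PySem.List.len_eq]; exact_mod_cast hp
      have hdrop : cs.drop pn = cs[pn] :: cs.drop (pn+1) := List.drop_eq_getElem_cons hp
      have hget : PySem.List.pyGetD cs (pn : Int) ' ' = cs[pn] := by
        rw [PySem.List.pyGetD_natCast]
        exact List.getD_eq_getElem cs ' ' hp
      by_cases hb : cs[pn] = '['
      · -- bracket position
        have hcond : (PySem.List.pyGetD cs (pn : Int) ' ' == '[') = true := by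
          rw [hget]; simp [hb]
        set rest := cs.drop (pn+1) with hrest
        set buf := rest.takeWhile (fun x => x != ']') with hbuf
        have hmem : ']' ∈ rest :=
          hpre pn hp (by rw [List.getElem?_eq_getElem hp, hb])
        have hfind : PySem.Chars.find rest [']'] = (buf.length : Int) :=
          find_singleton rest ']' hmem
        have hle : pn + 1 ≤ cs.length := hp
        have hff : PySem.Chars.findFrom cs [']'] ((pn : Int) + 1) none
            = ((pn + 1 + buf.length : Nat) : Int) := by
          have h1 : ((pn : Int) + 1) = ((pn + 1 : Nat) : Int) := by push_cast; ring
          rw [h1, PySem.Chars.findFrom_natCast cs [']'] (pn+1) hle, ← hrest, hfind,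
            if_neg (by omega)]
          push_cast; ring
        have hslice : PySem.List.slice cs (some ((pn : Int) + 1))
            (some ((pn + 1 + buf.length : Nat) : Int)) = buf := by
          have h1 : ((pn : Int) + 1) = ((pn + 1 : Nat) : Int) := by push_cast; ring
          rw [h1, PySem.List.slice_natCast, ← hrest]
          rw [show pn + 1 + buf.length - (pn + 1) = buf.length by omega]
          exact take_takeWhile _ rest
        rw [inlistLoop, if_pos hguard, hcond, if_pos rfl]
        rw [hff]
        dsimp only
        rw [hslice]
        have hcast : ((pn + 1 + buf.length : Nat) : Int) + 1
            = ((pn + 1 + buf.length + 1 : Nat) : Int) := by push_cast; ring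
        rw [hcast, ih (pn + 1 + buf.length + 1) _ (by omega)]
        have hdrops : cs.drop (pn + 1 + buf.length + 1) = rest.drop (buf.length + 1) := by
          rw [hrest, List.drop_drop]
          congr 1
        rw [hdrop, motifGroups, if_pos hb, ← hbuf]
        dsimp only
        rw [← hdrops]
        simp only [List.foldl_cons]
        rfl
      · -- literal character position
        have hcond : (PySem.List.pyGetD cs (pn : Int) ' ' == '[') = false := by
          rw [hget]; simp [hb]
        rw [inlistLoop, if_pos hguard, hcond]
        simp only [Bool.false_eq_true, if_false]
        have hcast : (pn : Int) + 1 = ((pn + 1 : Nat) : Int) := by push_cast; ring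
        rw [hcast, ih (pn+1) _ (by omega)]
        rw [hdrop, motifGroups, if_neg hb]
        simp only [List.foldl_cons]
        congr 1
        rw [hget]
        by_cases hls : ls.isEmpty
        · simp [stepA, hls]
        · simp [stepA, hls]
    · -- loop guard false: suffix empty
      have hdrop : cs.drop pn = [] := List.drop_eq_nil_of_le (by omega)
      rw [inlistLoop, if_neg (by rw [PySem.List.len_eq]; exact_mod_cast hp)]
      rw [hdrop]
      simp [motifGroups]

-- ===== VERDICT (by name: the statement is the Claim_ definition above) =====
theorem inlist_motifs_spec : Claim_equal_inlist_motifs := by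
  intro motif flg _hdom hpre
  show inlist_motifs motif flg = inlist_motifs_alt motif flg
  unfold inlist_motifs inlist_motifs_alt
  dsimp only
  rw [show (0 : Int) = ((0 : Nat) : Int) from rfl,
    loop_eq_fold motif.toList hpre (motif.toList.length + 1) 0 [] (by omega),
    List.drop_zero, fold_from_nil _ (motifGroups_ne_nil _)]
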